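-- pv_equiv track=rewrite | github.com/gbokas/HEA | heaFunctionsFaster.py | SplitUpperCase
-- ===== SOURCE A (Python) =====
-- def SplitUpperCase(text):
--     result = ''
--     for char in text:
--         if char.isupper():
--             result += " " + char
--         else:
--             result += char
--     return result.split()
-- ===== SOURCE B (Python) =====
-- def SplitUpperCase(text):
--     words = []
--     current = ''
--     for ch in text:
--         if ch.isspace():
--             if current:
--                 words.append(current)
--             current = ''
--         elif ch.isupper():
--             if current:
--                 words.append(current)
--             current = ch
--         else:
--             current += ch
--     if current:
--         words.append(current)
--     return words
-- ===== Notes on version B (the rewrite author's own statement) =====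
-- stated objective: simpler
-- what changed: B tokenizes in one pass with a words list and a current buffer (flush on whitespace, flush-and-start on uppercase) instead of building an intermediate marked string and delegating to str.split().
import Mathlib
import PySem

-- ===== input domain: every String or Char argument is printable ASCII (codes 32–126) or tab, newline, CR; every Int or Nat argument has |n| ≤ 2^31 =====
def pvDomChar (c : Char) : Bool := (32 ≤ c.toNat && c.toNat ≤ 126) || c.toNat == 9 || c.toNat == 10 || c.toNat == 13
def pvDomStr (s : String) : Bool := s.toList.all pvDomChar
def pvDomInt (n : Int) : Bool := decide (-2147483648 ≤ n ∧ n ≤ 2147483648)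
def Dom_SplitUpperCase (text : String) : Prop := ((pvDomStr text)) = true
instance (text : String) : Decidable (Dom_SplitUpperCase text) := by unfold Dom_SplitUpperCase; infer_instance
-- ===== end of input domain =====

-- B builds the word list directly with a words-list + current-buffer tokenizer instead of concatenating a marked string and calling split(). Objective: simpler.

-- ===== PORT A =====
-- A: build result string, inserting " " before each uppercase char, then result.split()
def SplitUpperCase (text : String) : List String :=
  let result : List Char :=
    text.toList.foldl (fun r c => if PySem.Chars.isupper c then r ++ (' ' :: [c]) else r ++ [c]) []
  (PySem.Chars.split₀ result).map String.mk

-- ===== PORT B =====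
-- B's loop step on state (words, current buffer)
def pvStepB (st : List (List Char) × List Char) (c : Char) : List (List Char) × List Char :=
  if PySem.Chars.isspace c then
    ((if st.2.isEmpty then st.1 else st.1 ++ [st.2]), [])
  else if PySem.Chars.isupper c then
    ((if st.2.isEmpty then st.1 else st.1 ++ [st.2]), [c])
  else
    (st.1, st.2 ++ [c])

def SplitUpperCase_alt (text : String) : List String :=
  let st := text.toList.foldl pvStepB ([], [])
  (if st.2.isEmpty then st.1 else st.1 ++ [st.2]).map String.mk

-- ===== PRECONDITION & SPEC =====
def Spec_SplitUpperCase (text : String) (out : List String) : Prop := out = SplitUpperCase_alt text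
instance (text : String) (out : List String) : Decidable (Spec_SplitUpperCase text out) := by unfold Spec_SplitUpperCase; infer_instance

-- ===== CLAIM (what is proved, stated in full; the proofs are below) =====
def Claim_equal_SplitUpperCase : Prop := ∀ (text : String), Dom_SplitUpperCase text → Spec_SplitUpperCase text (SplitUpperCase text)

-- ===== LEMMAS AND PROOFS =====

-- A's per-char contribution to the marked string
def pvMark (c : Char) : List Char := if PySem.Chars.isupper c then [' ', c] else [c]

theorem pvMark_upper_not_space {c : Char} (h : PySem.Chars.isupper c = true) :
    PySem.Chars.isspace c = false := by
  simp only [PySem.Chars.isupper, Bool.and_eq_true, decide_eq_true_eq] at h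
  have h1 : 65 ≤ c.toNat := h.1
  have h2 : c.toNat ≤ 90 := h.2
  simp only [PySem.Chars.isspace, Bool.or_eq_false_iff, Bool.and_eq_false_iff,
    decide_eq_false_iff_not]
  omega

-- unfolding equations of split₀'s worker
theorem pvGo_space (c : Char) (l cur : List Char) (acc : List (List Char))
    (h : PySem.Chars.isspace c = true) :
    PySem.Chars.split₀.go (c :: l) cur acc =
      if cur.isEmpty then PySem.Chars.split₀.go l [] acc
      else PySem.Chars.split₀.go l [] (cur.reverse :: acc) := by
  simp [PySem.Chars.split₀.go, h]

theorem pvGo_nospace (c : Char) (l cur : List Char) (acc : List (List Char))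
    (h : PySem.Chars.isspace c = false) :
    PySem.Chars.split₀.go (c :: l) cur acc = PySem.Chars.split₀.go l (c :: cur) acc := by
  simp [PySem.Chars.split₀.go, h]

theorem pvGo_nil (cur : List Char) (acc : List (List Char)) :
    PySem.Chars.split₀.go [] cur acc =
      if cur.isEmpty then acc.reverse else (cur.reverse :: acc).reverse := by
  simp [PySem.Chars.split₀.go]

-- key invariant: Python's split() over A's marked string equals B's fold,
-- go's accumulators being the reversed words list and the reversed current buffer
theorem pvKey (l : List Char) : ∀ (cur : List Char) (acc : List (List Char)),
    PySem.Chars.split₀.go (l.flatMap pvMark) cur acc =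
      (fun st : List (List Char) × List Char =>
        if st.2.isEmpty then st.1 else st.1 ++ [st.2])
        (l.foldl pvStepB (acc.reverse, cur.reverse)) := by
  induction l with
  | nil =>
    intro cur acc
    simp only [List.flatMap_nil, List.foldl_nil, pvGo_nil]
    by_cases h : cur.isEmpty
    · simp [List.isEmpty_iff.mp h]
    · have h2 : cur.reverse.isEmpty = false := by simp_all [List.isEmpty_iff]
      simp [h, h2]
  | cons c rest ih =>
    intro cur acc
    simp only [List.flatMap_cons, List.foldl_cons]
    by_cases hs : PySem.Chars.isspace c = true
    · have hu : PySem.Chars.isupper c = false := by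
        cases hcu : PySem.Chars.isupper c
        · rfl
        · rw [pvMark_upper_not_space hcu] at hs; exact absurd hs (by simp)
      rw [show pvMark c = [c] from by simp [pvMark, hu], List.singleton_append,
        pvGo_space c _ cur acc hs]
      by_cases h : cur.isEmpty
      · rw [if_pos h, ih [] acc]
        simp [pvStepB, hs, List.isEmpty_iff.mp h]
      · rw [if_neg h, ih [] (cur.reverse :: acc)]
        have h2 : cur.reverse.isEmpty = false := by simp_all [List.isEmpty_iff]
        simp [pvStepB, hs, h2]
    · have hs' : PySem.Chars.isspace c = false := by simpa using hs
      by_cases hu : PySem.Chars.isupper c = true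
      · rw [show pvMark c = [' ', c] from by simp [pvMark, hu],
          show ([' ', c] ++ rest.flatMap pvMark) = ' ' :: c :: rest.flatMap pvMark from rfl,
          pvGo_space ' ' _ cur acc (by decide)]
        by_cases h : cur.isEmpty
        · rw [if_pos h, pvGo_nospace c _ [] acc hs', ih [c] acc]
          simp [pvStepB, hs', hu, List.isEmpty_iff.mp h]
        · rw [if_neg h, pvGo_nospace c _ [] (cur.reverse :: acc) hs',
            ih [c] (cur.reverse :: acc)]
          have h2 : cur.reverse.isEmpty = false := by simp_all [List.isEmpty_iff]
          simp [pvStepB, hs', h2, hu]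
      · have hu' : PySem.Chars.isupper c = false := by simpa using hu
        rw [show pvMark c = [c] from by simp [pvMark, hu'], List.singleton_append,
          pvGo_nospace c _ cur acc hs', ih (c :: cur) acc]
        simp [pvStepB, hs', hu']

-- ===== VERDICT (by name: the statement is the Claim_ definition above) =====
theorem SplitUpperCase_spec : Claim_equal_SplitUpperCase := by
  intro text _
  show SplitUpperCase text = SplitUpperCase_alt text
  unfold SplitUpperCase SplitUpperCase_alt
  rw [show (fun (r : List Char) (c : Char) =>
        if PySem.Chars.isupper c then r ++ (' ' :: [c]) else r ++ [c]) =
      (fun r c => r ++ pvMark c) from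
    funext fun r => funext fun c => by simp only [pvMark]; split <;> rfl]
  rw [PySem.List.foldl_append_eq_flatMap pvMark text.toList []]
  simp only [List.nil_append, PySem.Chars.split₀]
  rw [pvKey text.toList [] []]
  simp
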